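-- pv_equiv track=rewrite | github.com/vschram/ZeroShot_for_PSL | Datasets/Dataset/init_data/0_get_wandb_data.py | find_common_key_groups
-- ===== SOURCE A (Python) =====
-- from itertools import combinations
--
-- def find_common_key_groups(data, num):
--     common_groups = {}
--
--     keys = list(data.keys())  # Get all keys from the dictionary
--     n = len(keys)
--
--     # Iterate over all possible group sizes (from 2 to total number of keys)
--     for group_size in range(2, n + 1):
--         for group in combinations(keys, group_size):  # Generate all subsets of size `group_size`
--             common_numbers = set(data[group[0]])  # Start with first key's numbers
--
--             # Intersect with all other keys in the group
--             for key in group[1:]: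
--                 common_numbers &= set(data[key])
--
--             # If at least 10 common numbers exist, save the group
--             if len(common_numbers) >= num:
--                 common_groups[group] = common_numbers
--
--     return common_groups
-- ===== SOURCE B (Python) =====
-- def find_common_key_groups(data, num):
--     # Apriori-style level-wise search: extend only surviving groups (common
--     # intersection still has >= num elements); intersections are monotone, so
--     # failing prefixes can never yield a qualifying supergroup.
--     keys = list(data.keys())
--
--     def children(group, common, rest):
--         out = []
--         for j, k in enumerate(rest):
--             new = common & set(data[k])
--             if len(new) >= num:
--                 out.append((group + (k,), new, rest[j + 1:]))
--         return out
--
--     frontier = []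
--     for i, k in enumerate(keys):
--         s = set(data[k])
--         if len(s) >= num:
--             frontier.append(((k,), s, keys[i + 1:]))
--
--     result = {}
--     for _ in range(len(keys)):
--         nxt = [c for f in frontier for c in children(*f)]
--         for group, common, _ in nxt:
--             result[group] = common
--         frontier = nxt
--     return result
-- ===== Notes on version B (the rewrite author's own statement) =====
-- stated objective: faster
-- what changed: Replaced blind enumeration of all 2^n key subsets with an apriori-style level-wise search that extends only groups whose running intersection still has >= num elements, pruning every supergroup of a failing group (intersection size is monotone), while emitting survivors size-by-size in the same order as A.
import Mathlib
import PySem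

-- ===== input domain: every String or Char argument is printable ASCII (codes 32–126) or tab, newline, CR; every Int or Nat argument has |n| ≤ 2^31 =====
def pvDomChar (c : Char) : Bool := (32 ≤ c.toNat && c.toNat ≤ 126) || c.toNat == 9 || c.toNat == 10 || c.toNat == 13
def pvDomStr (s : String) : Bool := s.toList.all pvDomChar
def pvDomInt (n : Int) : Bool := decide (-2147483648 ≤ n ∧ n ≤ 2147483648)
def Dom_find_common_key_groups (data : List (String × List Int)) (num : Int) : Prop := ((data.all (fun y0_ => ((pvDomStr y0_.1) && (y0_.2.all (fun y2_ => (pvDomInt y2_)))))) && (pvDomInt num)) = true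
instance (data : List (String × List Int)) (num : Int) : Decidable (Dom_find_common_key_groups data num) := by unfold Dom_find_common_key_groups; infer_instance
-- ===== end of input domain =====

-- B replaces A's enumeration of all key subsets by an apriori-style level-wise search that
-- prunes every extension of a group whose intersection is already below num (objective: faster).


-- ===== PORT A =====
-- itertools.combinations(keys, k), in itertools' order
def pvCombos {α : Type} : Nat → List α → List (List α)
  | 0, _ => [[]]
  | _ + 1, [] => []
  | k + 1, x :: xs => (pvCombos k xs).map (fun g => x :: g) ++ pvCombos (k + 1) xs

-- The dict 'common_groups' is keyed by the group tuples, which are pairwise distinct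
-- (combinations of the dict's unique keys, of pairwise distinct sizes per outer round),
-- so every insertion appends a fresh key: ported as list append.
def find_common_key_groups (data : List (String × List Int)) (num : Int) : List (List String × List Int) :=
  let d := PySem.Dict.ofList data
  let keys := d.keys
  let n := keys.length
  (PySem.List.pyRange 2 ((n : Int) + 1) 1).foldl (fun acc sz =>
    (pvCombos sz.toNat keys).foldl (fun acc group =>
      match group with
      | [] => acc   -- unreachable (sz ≥ 2): total-function guard only
      | k0 :: rest =>
        let common := rest.foldl
          (fun s k => PySem.Set.inter s (PySem.Set.ofList (d.getD k [])))
          (PySem.Set.ofList (d.getD k0 []))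
        if num ≤ PySem.Set.len common then acc ++ [(group, common)] else acc) acc) []

-- ===== PORT B =====
-- B's children(group, common, rest): extensions by one later key that keep ≥ num common elements
def pvChildren (d : PySem.Dict String (List Int)) (num : Int) (group : List String)
    (common : PySem.Set Int) : List String → List (List String × PySem.Set Int × List String)
  | [] => []
  | k :: rest =>
    let nw := PySem.Set.inter common (PySem.Set.ofList (d.getD k []))
    (if num ≤ PySem.Set.len nw then [(group ++ [k], nw, rest)] else []) ++
      pvChildren d num group common rest

-- B's seeding loop: singleton groups that survive the size test, with their key suffix
def pvSeeds (d : PySem.Dict String (List Int)) (num : Int) :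
    List String → List (List String × PySem.Set Int × List String)
  | [] => []
  | k :: rest =>
    let s := PySem.Set.ofList (d.getD k [])
    (if num ≤ PySem.Set.len s then [([k], s, rest)] else []) ++ pvSeeds d num rest

-- result dict: group keys are pairwise distinct (see PORT A), so insertion = append
def find_common_key_groups_alt (data : List (String × List Int)) (num : Int) : List (List String × List Int) :=
  let d := PySem.Dict.ofList data
  let keys := d.keys
  let st := (PySem.List.pyRange 0 (keys.length : Int) 1).foldl
    (fun (st : List (List String × List Int) × List (List String × PySem.Set Int × List String)) _ =>
      let nxt := st.2.flatMap (fun c => pvChildren d num c.1 c.2.1 c.2.2)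
      (st.1 ++ nxt.map (fun c => (c.1, c.2.1)), nxt))
    ([], pvSeeds d num keys)
  st.1

-- ===== PRECONDITION & SPEC =====
def Spec_find_common_key_groups (data : List (String × List Int)) (num : Int) (out : List (List String × List Int)) : Prop := out = find_common_key_groups_alt data num
instance (data : List (String × List Int)) (num : Int) (out : List (List String × List Int)) : Decidable (Spec_find_common_key_groups data num out) := by unfold Spec_find_common_key_groups; infer_instance

-- ===== CLAIM (what is proved, stated in full; the proofs are below) =====
def Claim_equal_find_common_key_groups : Prop := ∀ (data : List (String × List Int)) (num : Int), Dom_find_common_key_groups data num → Spec_find_common_key_groups data num (find_common_key_groups data num)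

-- ===== LEMMAS AND PROOFS =====

-- value set of a key
def pvVal (d : PySem.Dict String (List Int)) (k : String) : PySem.Set Int :=
  PySem.Set.ofList (d.getD k [])

-- A's running intersection over the tail of a group
def pvInter (d : PySem.Dict String (List Int)) (s : PySem.Set Int) (l : List String) : PySem.Set Int :=
  l.foldl (fun s k => PySem.Set.inter s (pvVal d k)) s

-- combinations together with the suffix of the source list after the last chosen element
def pvCombosR {α : Type} : Nat → List α → List (List α × List α)
  | 0, xs => [([], xs)]
  | _ + 1, [] => []
  | k + 1, x :: xs => (pvCombosR k xs).map (fun p => (x :: p.1, p.2)) ++ pvCombosR (k + 1) xs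

-- all (element, suffix-after-it) pairs of a list
def pvExt {α : Type} : List α → List (α × List α)
  | [] => []
  | x :: xs => (x, xs) :: pvExt xs

-- the survival test A applies to a group (carrying the suffix)
def pvStep (d : PySem.Dict String (List Int)) (num : Int) (p : List String × List String) :
    Option (List String × PySem.Set Int × List String) :=
  match p.1 with
  | [] => none
  | k0 :: rest =>
    let s := pvInter d (pvVal d k0) rest
    if num ≤ PySem.Set.len s then some (p.1, s, p.2) else none

-- the same test on a bare group (what A's inner loop emits)
def pvPairStep (d : PySem.Dict String (List Int)) (num : Int) (g : List String) :
    Option (List String × List Int) :=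
  match g with
  | [] => none
  | k0 :: rest =>
    let s := pvInter d (pvVal d k0) rest
    if num ≤ PySem.Set.len s then some (g, s) else none

-- B's frontier after m rounds
def pvFr (d : PySem.Dict String (List Int)) (num : Int) (keys : List String) :
    Nat → List (List String × PySem.Set Int × List String)
  | 0 => pvSeeds d num keys
  | m + 1 => (pvFr d num keys m).flatMap (fun c => pvChildren d num c.1 c.2.1 c.2.2)

lemma pvCombos_eq_map_fst {α : Type} (k : Nat) (xs : List α) :
    pvCombos k xs = (pvCombosR k xs).map (·.1) := by
  induction xs generalizing k with
  | nil => cases k <;> simp [pvCombos, pvCombosR]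
  | cons x xs ih =>
    cases k with
    | zero => simp [pvCombos, pvCombosR]
    | succ k => simp [pvCombos, pvCombosR, ih, List.map_map, Function.comp]

lemma pvCombosR_eq_nil {α : Type} (k : Nat) (xs : List α) (h : xs.length < k) :
    pvCombosR k xs = [] := by
  induction xs generalizing k with
  | nil => cases k with
    | zero => omega
    | succ k => simp [pvCombosR]
  | cons x xs ih =>
    cases k with
    | zero => omega
    | succ k =>
      simp only [List.length_cons] at h
      simp [pvCombosR, ih k (by omega), ih (k + 1) (by omega)]

lemma pvCombosR_length {α : Type} (k : Nat) (xs : List α) :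
    ∀ p ∈ pvCombosR k xs, p.1.length = k := by
  induction xs generalizing k with
  | nil => cases k with
    | zero => intro p hp; simp [pvCombosR] at hp; simp [hp]
    | succ k => intro p hp; simp [pvCombosR] at hp
  | cons x xs ih =>
    cases k with
    | zero => intro p hp; simp [pvCombosR] at hp; simp [hp]
    | succ k =>
      intro p hp
      simp only [pvCombosR, List.mem_append, List.mem_map] at hp
      rcases hp with ⟨q, hq, rfl⟩ | hp
      · simp [ih k q hq]
      · exact ih (k + 1) p hp

-- structural identity: (k+1)-combinations are one-later-element extensions of k-combinations
lemma pvCombosR_succ {α : Type} (k : Nat) (ys : List α) :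
    pvCombosR (k + 1) ys =
      (pvCombosR k ys).flatMap (fun p => (pvExt p.2).map (fun q => (p.1 ++ [q.1], q.2))) := by
  induction ys generalizing k with
  | nil => cases k <;> simp [pvCombosR, pvExt]
  | cons y ys ih =>
    cases k with
    | zero => simp [pvCombosR, pvExt, ih 0]
    | succ k =>
      simp only [pvCombosR, List.flatMap_append, List.flatMap_map, ih k, ih (k + 1),
        List.cons_append, List.map_flatMap, List.map_map, Function.comp_def]

lemma flatMap_filterMap_eq {α β γ : Type} (l : List α) (f : α → Option β) (g : β → List γ) :
    (l.filterMap f).flatMap g =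
      l.flatMap (fun a => match f a with | some b => g b | none => []) := by
  induction l with
  | nil => simp
  | cons a l ih =>
    cases h : f a <;> simp [h, ih]

lemma pvInter_append (d : PySem.Dict String (List Int)) (s : PySem.Set Int)
    (l : List String) (x : String) :
    pvInter d s (l ++ [x]) = PySem.Set.inter (pvInter d s l) (pvVal d x) := by
  simp [pvInter, List.foldl_append]

lemma len_inter_le (s t : PySem.Set Int) :
    PySem.Set.len (PySem.Set.inter s t) ≤ PySem.Set.len s := by
  simp only [PySem.Set.len, PySem.Set.inter, Nat.cast_le]
  exact List.length_filter_le _ _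

-- pointwise step: surviving parent ⇒ children = filtered extensions
lemma pvChildren_eq (d : PySem.Dict String (List Int)) (num : Int) (k0 : String)
    (rest : List String) (r : List String) :
    pvChildren d num (k0 :: rest) (pvInter d (pvVal d k0) rest) r =
      ((pvExt r).map (fun q => ((k0 :: rest) ++ [q.1], q.2))).filterMap (pvStep d num) := by
  induction r with
  | nil => simp [pvChildren, pvExt]
  | cons x xs ih =>
    have hval : ∀ k : String, PySem.Set.ofList (d.getD k []) = pvVal d k := fun _ => rfl
    have hstep : pvStep d num ((k0 :: rest) ++ [x], xs) =
        if num ≤ PySem.Set.len (PySem.Set.inter (pvInter d (pvVal d k0) rest) (pvVal d x)) then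
          some ((k0 :: rest) ++ [x],
            PySem.Set.inter (pvInter d (pvVal d k0) rest) (pvVal d x), xs)
        else none := by
      simp [pvStep, List.cons_append, pvInter_append]
    simp only [pvChildren, pvExt, List.map_cons, List.filterMap_cons, hstep, hval, ih]
    by_cases hc : num ≤ PySem.Set.len (PySem.Set.inter (pvInter d (pvVal d k0) rest) (pvVal d x))
    · simp only [if_pos hc]; simp
    · simp only [if_neg hc]; simp

-- pointwise step: failing parent ⇒ every extension fails
lemma pvStep_ext_none (d : PySem.Dict String (List Int)) (num : Int) (k0 : String)
    (rest : List String) (r : List String)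
    (hbad : ¬ num ≤ PySem.Set.len (pvInter d (pvVal d k0) rest)) :
    ((pvExt r).map (fun q => ((k0 :: rest) ++ [q.1], q.2))).filterMap (pvStep d num) = [] := by
  have hstep : ∀ (a : String) (b : List String), pvStep d num (k0 :: (rest ++ [a]), b) = none := by
    intro a b
    have hle := len_inter_le (pvInter d (pvVal d k0) rest) (pvVal d a)
    have h2 := pvInter_append d (pvVal d k0) rest a
    simp only [pvStep, h2]
    rw [if_neg (by omega)]
  refine List.filterMap_eq_nil_iff.mpr ?_
  intro p hp
  simp only [List.mem_map] at hp
  obtain ⟨q, hq, rfl⟩ := hp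
  exact hstep q.1 q.2

lemma pvSeeds_eq (d : PySem.Dict String (List Int)) (num : Int) (ys : List String) :
    pvSeeds d num ys = (pvCombosR 1 ys).filterMap (pvStep d num) := by
  induction ys with
  | nil => simp [pvSeeds, pvCombosR]
  | cons x xs ih =>
    have hstep : pvStep d num ([x], xs) =
        if num ≤ PySem.Set.len (PySem.Set.ofList (d.getD x [])) then
          some ([x], PySem.Set.ofList (d.getD x []), xs) else none := rfl
    simp only [pvSeeds, pvCombosR, List.map_cons, List.map_nil,
      List.singleton_append, List.filterMap_cons, hstep, ih, PySem.Set.len]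
    by_cases hc : num ≤ (List.length (PySem.Set.ofList (d.getD x [])) : Int)
    · simp [if_pos hc]
    · simp [if_neg hc]

-- central invariant: B's frontier after m rounds = A's filtered (m+1)-combinations
lemma pvFr_eq (d : PySem.Dict String (List Int)) (num : Int) (keys : List String) (m : Nat) :
    pvFr d num keys m = (pvCombosR (m + 1) keys).filterMap (pvStep d num) := by
  induction m with
  | zero => exact pvSeeds_eq d num keys
  | succ m ih =>
    rw [show m + 1 + 1 = (m + 1) + 1 from rfl, pvCombosR_succ, List.filterMap_flatMap]
    show (pvFr d num keys m).flatMap (fun c => pvChildren d num c.1 c.2.1 c.2.2) = _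
    rw [ih, flatMap_filterMap_eq]
    refine List.flatMap_congr (fun p hp => ?_)
    have hlen : p.1.length = m + 1 := pvCombosR_length (m + 1) keys p hp
    obtain ⟨g, r⟩ := p
    cases g with
    | nil => simp at hlen
    | cons k0 rest =>
      by_cases hc : num ≤ PySem.Set.len (pvInter d (pvVal d k0) rest)
      · have : pvStep d num (k0 :: rest, r) = some (k0 :: rest, pvInter d (pvVal d k0) rest, r) := by
          simp only [pvStep]; rw [if_pos hc]
        rw [this]
        exact pvChildren_eq d num k0 rest r
      · have : pvStep d num (k0 :: rest, r) = none := by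
          simp only [pvStep]; rw [if_neg hc]
        rw [this, pvStep_ext_none d num k0 rest r hc]

-- A's inner loop body, named
def pvBodyA (d : PySem.Dict String (List Int)) (num : Int)
    (acc : List (List String × List Int)) (group : List String) : List (List String × List Int) :=
  match group with
  | [] => acc
  | k0 :: rest =>
    let common := rest.foldl
      (fun s k => PySem.Set.inter s (PySem.Set.ofList (d.getD k [])))
      (PySem.Set.ofList (d.getD k0 []))
    if num ≤ PySem.Set.len common then acc ++ [(group, common)] else acc

-- A's inner loop emits the filtered groups of one size
lemma pvInnerA (d : PySem.Dict String (List Int)) (num : Int) (gs : List (List String))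
    (acc : List (List String × List Int)) :
    gs.foldl (fun acc group =>
      match group with
      | [] => acc
      | k0 :: rest =>
        let common := rest.foldl
          (fun s k => PySem.Set.inter s (PySem.Set.ofList (d.getD k [])))
          (PySem.Set.ofList (d.getD k0 []))
        if num ≤ PySem.Set.len common then acc ++ [(group, common)] else acc) acc =
      acc ++ gs.filterMap (pvPairStep d num) := by
  show gs.foldl (pvBodyA d num) acc = acc ++ gs.filterMap (pvPairStep d num)
  induction gs generalizing acc with
  | nil => simp
  | cons g gs ih =>
    rw [List.foldl_cons]
    cases g with
    | nil => exact (ih acc).trans (by simp [pvPairStep])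
    | cons k0 rest =>
      by_cases hc : num ≤ PySem.Set.len (pvInter d (pvVal d k0) rest)
      · have e : pvBodyA d num acc (k0 :: rest) =
            acc ++ [(k0 :: rest, pvInter d (pvVal d k0) rest)] := by
          show (if num ≤ PySem.Set.len (pvInter d (pvVal d k0) rest) then
              acc ++ [(k0 :: rest, pvInter d (pvVal d k0) rest)] else acc) = _
          rw [if_pos hc]
        have estep : pvPairStep d num (k0 :: rest) =
            some (k0 :: rest, pvInter d (pvVal d k0) rest) := by
          simp only [pvPairStep]; rw [if_pos hc]
        rw [e, ih]
        simp [estep]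
      · have e : pvBodyA d num acc (k0 :: rest) = acc := by
          show (if num ≤ PySem.Set.len (pvInter d (pvVal d k0) rest) then
              acc ++ [(k0 :: rest, pvInter d (pvVal d k0) rest)] else acc) = _
          rw [if_neg hc]
        have estep : pvPairStep d num (k0 :: rest) = none := by
          simp only [pvPairStep]; rw [if_neg hc]
        rw [e, ih]
        simp [estep]

lemma pyRange_count (m : Nat) (a : Int) :
    PySem.List.pyRange a (a + (m : Int)) 1 = (List.range m).map (fun i : Nat => a + (i : Int)) := by
  induction m generalizing a with
  | zero => simp [PySem.List.pyRange]
  | succ m ih =>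
    rw [Nat.cast_add_one]
    rw [PySem.List.pyRange_one_cons (by omega : a < a + ((m : Int) + 1))]
    rw [show a + ((m : Int) + 1) = (a + 1) + (m : Int) by ring, ih (a + 1)]
    rw [List.range_succ_eq_map, List.map_cons, List.map_map]
    refine congrArg₂ _ (by simp) (List.map_congr_left (fun i _ => ?_))
    simp only [Function.comp_apply]
    push_cast
    ring

lemma pyRange_zero_eq (m : Nat) :
    PySem.List.pyRange 0 (m : Int) 1 = (List.range m).map (fun i : Nat => (i : Int)) := by
  rw [show (m : Int) = 0 + (m : Int) by ring, pyRange_count m 0]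
  exact List.map_congr_left (fun i _ => by ring)

lemma pyRange_two_eq (m : Nat) :
    PySem.List.pyRange 2 ((m : Int) + 2) 1 = (List.range m).map (fun i : Nat => ((i : Int) + 2)) := by
  have h := pyRange_count m 2
  rw [show (2 : Int) + (m : Int) = (m : Int) + 2 by ring] at h
  rw [h]
  exact List.map_congr_left (fun i _ => by ring)

-- the emitted pair of a surviving triple is pvPairStep of its group
lemma map_proj_filterMap_step (d : PySem.Dict String (List Int)) (num : Int)
    (l : List (List String × List String)) :
    ((l.filterMap (pvStep d num)).map (fun c => (c.1, c.2.1))) =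
      (l.map (·.1)).filterMap (pvPairStep d num) := by
  induction l with
  | nil => simp
  | cons a l ih =>
    obtain ⟨g, r⟩ := a
    cases g with
    | nil =>
      have h1 : pvStep d num (([] : List String), r) = none := rfl
      have h2 : pvPairStep d num ([] : List String) = none := rfl
      simp [List.map_cons, h1, h2, ih]
    | cons k0 rest =>
      by_cases hc : num ≤ PySem.Set.len (pvInter d (pvVal d k0) rest)
      · have h1 : pvStep d num (k0 :: rest, r) = some (k0 :: rest, pvInter d (pvVal d k0) rest, r) := by
          simp only [pvStep]; rw [if_pos hc]
        have h2 : pvPairStep d num (k0 :: rest) = some (k0 :: rest, pvInter d (pvVal d k0) rest) := by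
          simp only [pvPairStep]; rw [if_pos hc]
        simp [List.map_cons, h1, h2, ih]
      · have h1 : pvStep d num (k0 :: rest, r) = none := by
          simp only [pvStep]; rw [if_neg hc]
        have h2 : pvPairStep d num (k0 :: rest) = none := by
          simp only [pvPairStep]; rw [if_neg hc]
        simp [List.map_cons, h1, h2, ih]

-- B's frontier-advance, named
def pvNext (d : PySem.Dict String (List Int)) (num : Int)
    (fr : List (List String × PySem.Set Int × List String)) :
    List (List String × PySem.Set Int × List String) :=
  fr.flatMap (fun c => pvChildren d num c.1 c.2.1 c.2.2)

lemma pvFr_iterate (d : PySem.Dict String (List Int)) (num : Int) (keys : List String) (m : Nat) :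
    (pvNext d num)^[m] (pvSeeds d num keys) = pvFr d num keys m := by
  induction m with
  | zero => rfl
  | succ m ih => rw [Function.iterate_succ_apply', ih]; rfl

-- B's loop, unrolled: emissions are the successive frontiers
lemma loopB (d : PySem.Dict String (List Int)) (num : Int) (l : List Int)
    (out0 : List (List String × List Int)) (fr : List (List String × PySem.Set Int × List String)) :
    l.foldl
      (fun (st : List (List String × List Int) × List (List String × PySem.Set Int × List String)) _ =>
        let nxt := st.2.flatMap (fun c => pvChildren d num c.1 c.2.1 c.2.2)
        (st.1 ++ nxt.map (fun c => (c.1, c.2.1)), nxt)) (out0, fr) =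
      (out0 ++ (List.range l.length).flatMap
          (fun i => ((pvNext d num)^[i + 1] fr).map (fun c => (c.1, c.2.1))),
        (pvNext d num)^[l.length] fr) := by
  induction l generalizing out0 fr with
  | nil => simp
  | cons x l ih =>
    rw [List.foldl_cons]
    refine (ih (out0 ++ (pvNext d num fr).map (fun c => (c.1, c.2.1))) (pvNext d num fr)).trans ?_
    refine congrArg₂ Prod.mk ?_ (Function.iterate_succ_apply (pvNext d num) l.length fr).symm
    rw [List.append_assoc]
    refine congrArg (out0 ++ ·) ?_
    simp only [List.length_cons]
    rw [List.range_succ_eq_map, List.flatMap_cons, List.flatMap_map]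
    simp [Function.iterate_succ_apply]

-- B's result, as per-size filtered combinations
lemma sideB (d : PySem.Dict String (List Int)) (num : Int) (keys : List String) :
    ((PySem.List.pyRange 0 (keys.length : Int) 1).foldl
      (fun (st : List (List String × List Int) × List (List String × PySem.Set Int × List String)) _ =>
        let nxt := st.2.flatMap (fun c => pvChildren d num c.1 c.2.1 c.2.2)
        (st.1 ++ nxt.map (fun c => (c.1, c.2.1)), nxt))
      ([], pvSeeds d num keys)).1 =
      (List.range keys.length).flatMap
        (fun i => (pvCombos (i + 2) keys).filterMap (pvPairStep d num)) := by
  have hlen : (PySem.List.pyRange 0 (keys.length : Int) 1).length = keys.length := by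
    rw [pyRange_zero_eq]; simp
  rw [loopB, hlen, List.nil_append]
  refine List.flatMap_congr (fun i _ => ?_)
  rw [pvFr_iterate, pvFr_eq, map_proj_filterMap_step, ← pvCombos_eq_map_fst]

-- ===== VERDICT (by name: the statement is the Claim_ definition above) =====
theorem find_common_key_groups_spec : Claim_equal_find_common_key_groups := by
  have main : ∀ (d : PySem.Dict String (List Int)) (num : Int) (keys : List String),
      (PySem.List.pyRange 2 ((keys.length : Int) + 1) 1).foldl (fun acc sz =>
        (pvCombos sz.toNat keys).foldl
          (fun acc group =>
            match group with
            | [] => acc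
            | k0 :: rest =>
              let common := rest.foldl
                (fun s k => PySem.Set.inter s (PySem.Set.ofList (d.getD k [])))
                (PySem.Set.ofList (d.getD k0 []))
              if num ≤ PySem.Set.len common then acc ++ [(group, common)] else acc) acc) [] =
      ((PySem.List.pyRange 0 (keys.length : Int) 1).foldl
        (fun (st : List (List String × List Int) × List (List String × PySem.Set Int × List String)) _ =>
          let nxt := st.2.flatMap (fun c => pvChildren d num c.1 c.2.1 c.2.2)
          (st.1 ++ nxt.map (fun c => (c.1, c.2.1)), nxt))
        ([], pvSeeds d num keys)).1 := by
    intro d num keys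
    rw [sideB]
    simp only [pvInnerA]
    rw [PySem.List.foldl_append_eq_flatMap, List.nil_append]
    cases hn : keys.length with
    | zero =>
      simp
    | succ m =>
      have hc2 : (((m + 1 : Nat)) : Int) + 1 = (m : Int) + 2 := by push_cast; ring
      rw [hc2, pyRange_two_eq m, List.flatMap_map]
      have htn : ∀ i : Nat, ((i : Int) + 2).toNat = i + 2 := fun i => by omega
      simp only [htn]
      rw [List.range_succ, List.flatMap_append]
      have hnil : pvCombos (m + 2) keys = [] := by
        rw [pvCombos_eq_map_fst, pvCombosR_eq_nil (m + 2) keys (by omega)]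
        simp
      simp [hnil]
  intro data num _
  exact main (PySem.Dict.ofList data) num (PySem.Dict.ofList data).keys
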